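-- pv_equiv track=rewrite | github.com/PillowGit/aoc | src/2024/20.py | sln1
-- ===== SOURCE A (Python) =====
-- from collections import defaultdict
--
-- def sln1(input):
--   start, end = None, None
--   for r in range(len(input)):
--     for c in range(len(input[r])):
--       if input[r][c] == 'S':
--         start = (r, c)
--       elif input[r][c] == 'E':
--         end = (r, c)
--   path, indices = [], {}
--   q = [(start, 0)]
--   while q:
--     (i, j), ind = q.pop()
--     indices[(i, j)] = ind
--     path.append((i, j))
--     if (i, j) == end:
--       break
--     for di, dj in [(0, 1), (0, -1), (1, 0), (-1, 0)]:
--       ni, nj = i + di, j + dj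
--       if ni not in range(len(input)) or nj not in range(len(input[ni])):
--         continue
--       if input[ni][nj] == '#':
--         continue
--       if (ni, nj) in indices:
--         continue
--       q.append(((ni, nj), ind + 1))
--
--   seconds = len(path) - 1
--   saved_seconds = defaultdict(int)
--   for i, j in path:
--     idx = indices[(i, j)]
--     for di, dj in [(0, 1), (0, -1), (1, 0), (-1, 0)]:
--       ni, nj = i + di, j + dj
--       if ni not in range(len(input)) or nj not in range(len(input[ni])):
--         continue
--       if input[ni][nj] == '.':
--         continue
--       ii, jj = ni + di, nj + dj
--       if ii not in range(len(input)) or jj not in range(len(input[ii])):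
--         continue
--       if input[ii][jj] == '#':
--         continue
--       if (ii, jj) not in indices:
--         continue
--       end_idx = indices[(ii, jj)]
--       if end_idx < idx:
--         continue
--       cheat_seconds = (idx + 1) + 1 + (seconds - end_idx)
--       saved = seconds - cheat_seconds
--       saved_seconds[saved] += 1
--   ans = 0
--   for k, v in saved_seconds.items():
--     if k >= 100:
--       ans += v
--   return ans
-- ===== SOURCE B (Python) =====
-- def sln1(input):
--   start, end = None, None
--   for r in range(len(input)):
--     for c in range(len(input[r])):
--       if input[r][c] == 'S':
--         start = (r, c)
--       elif input[r][c] == 'E':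
--         end = (r, c)
--   path, indices = [], {}
--   q = [(start, 0)]
--   while q:
--     (i, j), ind = q.pop()
--     indices[(i, j)] = ind
--     path.append((i, j))
--     if (i, j) == end:
--       break
--     for di, dj in [(0, 1), (0, -1), (1, 0), (-1, 0)]:
--       ni, nj = i + di, j + dj
--       if ni not in range(len(input)) or nj not in range(len(input[ni])):
--         continue
--       if input[ni][nj] == '#':
--         continue
--       if (ni, nj) in indices:
--         continue
--       q.append(((ni, nj), ind + 1))
--   # Count cheats by scanning grid cells as tunnel middles, one axis at a time;
--   # record each qualifying crossing at its earlier endpoint, then tally along the path.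
--   good_starts = {}
--   for r in range(len(input)):
--     for c in range(len(input[r])):
--       if input[r][c] == '.':
--         continue
--       for p1, p2 in (((r, c - 1), (r, c + 1)), ((r - 1, c), (r + 1, c))):
--         if p1 in indices and p2 in indices:
--           i1, i2 = indices[p1], indices[p2]
--           if abs(i1 - i2) - 2 >= 100:
--             lo = p1 if i1 < i2 else p2
--             good_starts[lo] = good_starts.get(lo, 0) + 1
--   return sum(good_starts.get(cell, 0) for cell in path)
-- ===== Notes on version B (the rewrite author's own statement) =====
-- stated objective: alternative
-- what changed: The per-path-cell, per-direction cheat scan with a defaultdict of savings buckets (filtered >=100 afterwards) is replaced by a single grid scan over tunnel middles: each non-'.' cell is tested once per axis for both opposite neighbours being on the path, qualifying crossings (gap-2 >= 100) are recorded at their earlier endpoint in a dict, and the answer is the sum of that dict over the path.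
import Mathlib
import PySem

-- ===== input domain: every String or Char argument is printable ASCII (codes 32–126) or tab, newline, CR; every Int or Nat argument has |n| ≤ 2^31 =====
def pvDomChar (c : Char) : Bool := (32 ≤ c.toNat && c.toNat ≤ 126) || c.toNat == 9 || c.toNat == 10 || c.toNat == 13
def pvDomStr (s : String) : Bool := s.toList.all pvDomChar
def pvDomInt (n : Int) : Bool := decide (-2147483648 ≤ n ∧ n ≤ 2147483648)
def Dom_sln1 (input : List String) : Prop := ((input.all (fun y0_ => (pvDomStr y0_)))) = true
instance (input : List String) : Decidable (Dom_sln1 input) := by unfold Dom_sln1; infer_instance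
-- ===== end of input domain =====

-- B replaces A's per-path-cell/per-direction cheat scan (savings buckets, filtered ≥ 100 at the
-- end) by one grid scan over tunnel middles, one test per axis, tallied along the path (objective:
-- alternative; same asymptotic cost).
-- The S/E search and the path walk are common to both Pythons and are shared helpers here.
-- pvRow/pvCell/pvGetIdx use total getD forms: every use below is guarded in range / in the dict,
-- exactly as the Python index/dict accesses are.

-- ===== PORT A =====
def pvRow (input : List String) (i : Int) : List Char :=
  (PySem.List.pyGetD input i "").toList

def pvCell (input : List String) (i j : Int) : Char :=
  PySem.List.pyGetD (pvRow input i) j ' '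

-- 'i in range(len(input)) and j in range(len(input[i]))'
def pvInB (input : List String) (i j : Int) : Bool :=
  decide (0 ≤ i) && decide (i < PySem.List.len input) &&
    decide (0 ≤ j) && decide (j < PySem.List.len (pvRow input i))

-- the first double loop of both Pythons: locate the (last) 'S' and 'E'
def pvFindSE (input : List String) : Option (Int × Int) × Option (Int × Int) :=
  (PySem.List.pyRange 0 (PySem.List.len input) 1).foldl (fun se r =>
    (PySem.List.pyRange 0 (PySem.List.len (pvRow input r)) 1).foldl (fun se c =>
      if pvCell input r c = 'S' then (some (r, c), se.2)
      else if pvCell input r c = 'E' then (se.1, some (r, c))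
      else se) se) (none, none)

def pvDirs : List (Int × Int) := [(0, 1), (0, -1), (1, 0), (-1, 0)]

-- the 'while q' walk of both Pythons; the Python stack's top (list end) is the HEAD here, so
-- q.pop() is pattern matching and q.append pushes with cons. Fuel only makes the recursion
-- structural; 4·(grid size)+8 exceeds the iteration count of every actual run.
def pvWalk (input : List String) (endp : Option (Int × Int)) :
    Nat → List ((Int × Int) × Int) → PySem.Dict (Int × Int) Int → List (Int × Int) →
      PySem.Dict (Int × Int) Int × List (Int × Int)
  | 0, _, ix, path => (ix, path)
  | _ + 1, [], ix, path => (ix, path)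
  | fuel + 1, (pij, ind) :: rest, ix, path =>
    let ix' := ix.insert pij ind
    let path' := path ++ [pij]
    if some pij = endp then (ix', path')
    else
      let q' := pvDirs.foldl
        (fun acc d =>
          let ni := pij.1 + d.1
          let nj := pij.2 + d.2
          if !(pvInB input ni nj) then acc
          else if pvCell input ni nj = '#' then acc
          else if (ix.insert pij ind).contains (ni, nj) then acc
          else ((ni, nj), ind + 1) :: acc) rest
      pvWalk input endp fuel q' ix' path'

def pvSize (input : List String) : Nat := (input.map (fun s => s.toList.length)).sum

def sln1 (input : List String) : Int :=
  let se := pvFindSE input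
  match se.1 with
  | none => 0   -- dead under Pre_sln1: Python raises TypeError unpacking None here
  | some st =>
    let wp := pvWalk input se.2 (4 * pvSize input + 8) [(st, 0)] PySem.Dict.empty []
    let ix := wp.1
    let path := wp.2
    let seconds : Int := PySem.List.len path - 1
    let saved := path.foldl (fun d p =>
      let idx := ix.getD p 0
      pvDirs.foldl (fun d dd =>
        let ni := p.1 + dd.1
        let nj := p.2 + dd.2
        if !(pvInB input ni nj) then d
        else if pvCell input ni nj = '.' then d
        else
          let ii := ni + dd.1
          let jj := nj + dd.2
          if !(pvInB input ii jj) then d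
          else if pvCell input ii jj = '#' then d
          else if !(ix.contains (ii, jj)) then d
          else
            let endIdx := ix.getD (ii, jj) 0
            if endIdx < idx then d
            else
              let cheat := (idx + 1) + 1 + (seconds - endIdx)
              d.modify (seconds - cheat) 0 (· + 1)) d) PySem.Dict.empty
    saved.items.foldl (fun a kv => if 100 ≤ kv.1 then a + kv.2 else a) 0

-- ===== PORT B =====
def sln1_alt (input : List String) : Int :=
  let se := pvFindSE input
  match se.1 with
  | none => 0   -- dead under Pre_sln1: Python raises TypeError unpacking None here
  | some st =>
    let wp := pvWalk input se.2 (4 * pvSize input + 8) [(st, 0)] PySem.Dict.empty []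
    let ix := wp.1
    let path := wp.2
    let good := (PySem.List.pyRange 0 (PySem.List.len input) 1).foldl (fun d r =>
      (PySem.List.pyRange 0 (PySem.List.len (pvRow input r)) 1).foldl (fun d c =>
        if pvCell input r c = '.' then d
        else
          [((r, c - 1), (r, c + 1)), ((r - 1, c), (r + 1, c))].foldl (fun d pr =>
            if ix.contains pr.1 && ix.contains pr.2 then
              let i1 := ix.getD pr.1 0
              let i2 := ix.getD pr.2 0
              if 100 ≤ |i1 - i2| - 2 then
                d.modify (if i1 < i2 then pr.1 else pr.2) 0 (· + 1)
              else d
            else d) d) d) PySem.Dict.empty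
    path.foldl (fun a cell => a + good.getD cell 0) 0

-- ===== PRECONDITION & SPEC =====
-- Pre_ excludes exactly the grids with no 'S' anywhere: there the Python A raises TypeError
-- unpacking start = None.
def Pre_sln1 (input : List String) : Prop :=
  input.any (fun s => s.toList.contains 'S') = true
instance (input : List String) : Decidable (Pre_sln1 input) := by unfold Pre_sln1; infer_instance

def pvWitness_sln1 : List String := ["S.#", "..E"]

def Spec_sln1 (input : List String) (out : Int) : Prop := out = sln1_alt input
instance (input : List String) (out : Int) : Decidable (Spec_sln1 input out) := by unfold Spec_sln1; infer_instance

-- ===== CLAIM (what is proved, stated in full; the proofs are below) =====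
def Claim_equal_sln1 : Prop := ∀ (input : List String), Dom_sln1 input → Pre_sln1 input → Spec_sln1 input (sln1 input)

-- ===== LEMMAS AND PROOFS =====

-- counting phases as named helpers of the ports are inlined there; proof-side notions follow.

-- generic fold/sum helpers -------------------------------------------------

theorem pv_foldl_flatMap {α β γ : Type} (g : β → List α) (f : γ → α → γ) :
    ∀ (l : List β) (init : γ),
      l.foldl (fun acc x => (g x).foldl f acc) init = (l.flatMap g).foldl f init := by
  intro l
  induction l with
  | nil => intro init; rfl
  | cons x t ih =>
    intro init
    simp only [List.foldl_cons, List.flatMap_cons, List.foldl_append]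
    exact ih _

theorem pv_sum_zero {α : Type} (l : List α) : (l.map (fun _ => (0 : Int))).sum = 0 := by
  induction l with
  | nil => rfl
  | cons x t _ => simp

theorem pv_sum_indicator {α : Type} [DecidableEq α] (t : α) (v : Int) :
    ∀ (l : List α), l.Nodup →
      (l.map (fun x => if x = t then v else 0)).sum = if t ∈ l then v else 0 := by
  intro l
  induction l with
  | nil => simp
  | cons x tl ih =>
    intro hnd
    rcases List.nodup_cons.mp hnd with ⟨hx, hnd'⟩
    by_cases hxt : x = t
    · have hnt : t ∉ tl := hxt ▸ hx
      have hmem : t ∈ x :: tl := List.mem_cons.mpr (Or.inl hxt.symm)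
      simp only [List.map_cons, List.sum_cons, if_pos hxt, ih hnd', if_neg hnt, if_pos hmem]
      omega
    · simp only [List.map_cons, List.sum_cons, if_neg hxt, ih hnd']
      have hiff : (t ∈ x :: tl) ↔ (t ∈ tl) := by
        constructor
        · intro h; rcases List.mem_cons.mp h with h | h
          · exact absurd h.symm hxt
          · exact h
        · exact fun h => List.mem_cons_of_mem _ h
      by_cases ht : t ∈ tl <;> simp [ht, hiff]

theorem pv_sumcount (P : Int → Prop) [DecidablePred P] :
    ∀ (xs : List Int) (l : List Int), l.Nodup → (∀ x ∈ xs, x ∈ l) →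
      (l.map (fun k => if P k then (xs.count k : Int) else 0)).sum
        = (xs.countP (fun s => decide (P s)) : Int) := by
  intro xs
  induction xs with
  | nil =>
    intro l _ _
    simp only [List.count_nil, List.countP_nil, Nat.cast_zero]
    calc (l.map (fun k => if P k then ((0:Nat) : Int) else 0)).sum
        = (l.map (fun _ => (0:Int))).sum := by
          apply congrArg; apply List.map_congr_left; intro k _; split <;> simp
      _ = 0 := pv_sum_zero l
  | cons x tl ih =>
    intro l hnd hsub
    have hxin : x ∈ l := hsub x (List.mem_cons_self)
    have hstep : ∀ k, (if P k then ((x :: tl).count k : Int) else 0)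
        = (if P k then (tl.count k : Int) else 0)
          + (if k = x then (if P x then (1:Int) else 0) else 0) := by
      intro k
      rw [List.count_cons]
      by_cases hkx : k = x
      · subst hkx
        simp only [BEq.rfl, if_true]
        split_ifs <;> push_cast <;> omega
      · have h1 : (x == k) = false := beq_eq_false_iff_ne.mpr fun h => hkx h.symm
        simp only [h1, Bool.false_eq_true, if_false, if_neg hkx, add_zero]
    calc (l.map (fun k => if P k then ((x :: tl).count k : Int) else 0)).sum
        = (l.map (fun k => (if P k then (tl.count k : Int) else 0)
              + (if k = x then (if P x then (1:Int) else 0) else 0))).sum := by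
          apply congrArg; apply List.map_congr_left; intro k _; exact hstep k
      _ = (l.map (fun k => if P k then (tl.count k : Int) else 0)).sum
            + (l.map (fun k => if k = x then (if P x then (1:Int) else 0) else 0)).sum := by
          rw [← PySem.List.sum_map_add_int]
      _ = (tl.countP (fun s => decide (P s)) : Int) + (if P x then (1:Int) else 0) := by
          rw [ih l hnd (fun y hy => hsub y (List.mem_cons_of_mem _ hy)),
              pv_sum_indicator x _ l hnd, if_pos hxin]
      _ = (((x :: tl).countP (fun s => decide (P s)) : Nat) : Int) := by
          rw [List.countP_cons]
          by_cases h1 : P x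
          · simp [h1]
          · simp [h1]

theorem pv_foldl_inv {α β : Type} (Q : α → Prop) (f : α → β → α) :
    ∀ (l : List β) (init : α), Q init → (∀ acc x, x ∈ l → Q acc → Q (f acc x)) →
      Q (l.foldl f init) := by
  intro l
  induction l with
  | nil => intro init h0 _; exact h0
  | cons x t ih =>
    intro init h0 hstep
    exact ih (f init x) (hstep init x (List.mem_cons_self) h0)
      (fun acc y hy hQ => hstep acc y (List.mem_cons_of_mem _ hy) hQ)

-- scan lemmas ---------------------------------------------------------------

theorem pv_scan_some (input : List String) (p : Int × Int)
    (h : (pvFindSE input).1 = some p) :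
    pvInB input p.1 p.2 = true ∧ pvCell input p.1 p.2 = 'S' := by
  have main : ∀ q, (pvFindSE input).1 = some q →
      pvInB input q.1 q.2 = true ∧ pvCell input q.1 q.2 = 'S' := by
    unfold pvFindSE
    refine pv_foldl_inv
      (fun (se : Option (Int × Int) × Option (Int × Int)) =>
        ∀ q, se.1 = some q → pvInB input q.1 q.2 = true ∧ pvCell input q.1 q.2 = 'S')
      _ _ _ (by intro q hq; cases hq) ?_
    intro acc r hr hQ
    refine pv_foldl_inv
      (fun (se : Option (Int × Int) × Option (Int × Int)) =>
        ∀ q, se.1 = some q → pvInB input q.1 q.2 = true ∧ pvCell input q.1 q.2 = 'S')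
      _ _ _ hQ ?_
    intro acc2 c hc hQ2
    rcases PySem.List.mem_pyRange_one.mp hr with ⟨hr0, hr1⟩
    rcases PySem.List.mem_pyRange_one.mp hc with ⟨hc0, hc1⟩
    by_cases hS : pvCell input r c = 'S'
    · simp only [if_pos hS]
      intro q hq
      cases hq
      constructor
      · simp only [pvInB, Bool.and_eq_true, decide_eq_true_eq]
        exact ⟨⟨⟨hr0, hr1⟩, hc0⟩, hc1⟩
      · exact hS
    · by_cases hE : pvCell input r c = 'E'
      · simp only [if_neg hS, if_pos hE]
        intro q hq; exact hQ2 q hq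
      · simp only [if_neg hS, if_neg hE]
        exact hQ2
  exact main p h

theorem pv_scan_exists (input : List String) (hpre : Pre_sln1 input) :
    ∃ p, (pvFindSE input).1 = some p := by
  unfold Pre_sln1 at hpre
  rw [List.any_eq_true] at hpre
  obtain ⟨s, hs, hS⟩ := hpre
  obtain ⟨r0, hr0, hgets⟩ := List.mem_iff_getElem.mp hs
  have hSc : 'S' ∈ s.toList := by
    simpa using hS
  obtain ⟨c0, hc0, hgetc⟩ := List.mem_iff_getElem.mp hSc
  -- the row and cell at those coordinates
  have hrow : pvRow input (r0 : Int) = s.toList := by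
    unfold pvRow
    rw [PySem.List.pyGetD_natCast]
    congr 1
    rw [List.getD_eq_getElem _ _ hr0, hgets]
  have hcell : pvCell input (r0 : Int) (c0 : Int) = 'S' := by
    unfold pvCell
    rw [hrow, PySem.List.pyGetD_natCast, List.getD_eq_getElem _ _ hc0, hgetc]
  -- fold machinery
  have hpres : ∀ (l : List Int) (acc : Option (Int × Int) × Option (Int × Int)),
      acc.1 ≠ none →
      ((l.foldl (fun se c =>
          if pvCell input (r0 : Int) c = 'S' then (some ((r0 : Int), c), se.2)
          else if pvCell input (r0 : Int) c = 'E' then (se.1, some ((r0 : Int), c))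
          else se) acc)).1 ≠ none := by
    intro l acc h0
    refine pv_foldl_inv (fun (se : Option (Int × Int) × Option (Int × Int)) => se.1 ≠ none)
      _ _ _ h0 ?_
    intro a x _ hQ
    by_cases h1 : pvCell input (r0 : Int) x = 'S'
    · simp [h1]
    · by_cases h2 : pvCell input (r0 : Int) x = 'E' <;> simp [h1, h2, hQ]
  have houter : ∀ (l : List Int) (acc : Option (Int × Int) × Option (Int × Int)),
      acc.1 ≠ none →
      ((l.foldl (fun se r =>
          (PySem.List.pyRange 0 (PySem.List.len (pvRow input r)) 1).foldl (fun se c =>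
            if pvCell input r c = 'S' then (some (r, c), se.2)
            else if pvCell input r c = 'E' then (se.1, some (r, c))
            else se) se) acc)).1 ≠ none := by
    intro l acc h0
    refine pv_foldl_inv (fun (se : Option (Int × Int) × Option (Int × Int)) => se.1 ≠ none)
      _ _ _ h0 ?_
    intro a r _ hQ
    refine pv_foldl_inv (fun (se : Option (Int × Int) × Option (Int × Int)) => se.1 ≠ none)
      _ _ _ hQ ?_
    intro a2 c _ hQ2
    by_cases h1 : pvCell input r c = 'S'
    · simp [h1]
    · by_cases h2 : pvCell input r c = 'E' <;> simp [h1, h2, hQ2]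
  -- split the outer range at r0
  have hrlen : ((r0 : Int)) < PySem.List.len input := by
    simp only [PySem.List.len_eq]
    exact_mod_cast hr0
  have hsplit : PySem.List.pyRange 0 (PySem.List.len input) 1
      = PySem.List.pyRange 0 (r0 : Int) 1
        ++ ((r0 : Int) :: PySem.List.pyRange ((r0 : Int) + 1) (PySem.List.len input) 1) := by
    rw [← PySem.List.pyRange_one_cons hrlen]
    exact PySem.List.pyRange_one_append 0 (r0 : Int) _ (by positivity) (le_of_lt hrlen)
  have hclen : ((c0 : Int)) < PySem.List.len (pvRow input (r0 : Int)) := by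
    rw [hrow]
    simp only [PySem.List.len_eq]
    exact_mod_cast hc0
  have hsplitc : PySem.List.pyRange 0 (PySem.List.len (pvRow input (r0 : Int))) 1
      = PySem.List.pyRange 0 (c0 : Int) 1
        ++ ((c0 : Int) :: PySem.List.pyRange ((c0 : Int) + 1)
            (PySem.List.len (pvRow input (r0 : Int))) 1) := by
    rw [← PySem.List.pyRange_one_cons hclen]
    exact PySem.List.pyRange_one_append 0 (c0 : Int) _ (by positivity) (le_of_lt hclen)
  have hne : (pvFindSE input).1 ≠ none := by
    unfold pvFindSE
    rw [hsplit, List.foldl_append, List.foldl_cons]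
    apply houter
    rw [hsplitc, List.foldl_append, List.foldl_cons, if_pos hcell]
    apply hpres
    simp
  exact Option.ne_none_iff_exists'.mp hne

-- walk invariant ------------------------------------------------------------

def okC (input : List String) (p : Int × Int) : Prop :=
  pvInB input p.1 p.2 = true ∧ ¬ pvCell input p.1 p.2 = '#'

def WInv (input : List String) (ix : PySem.Dict (Int × Int) Int)
    (path : List (Int × Int)) : Prop :=
  (∀ p, ix.contains p = true → okC input p) ∧ (∀ p ∈ path, ix.contains p = true)

theorem pv_foldl_guard {α β : Type} (P : α → Prop) (step : List α → β → List α)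
    (hstep : ∀ acc b, step acc b = acc ∨ ∃ e, P e ∧ step acc b = e :: acc) :
    ∀ (l : List β) (acc : List α) (a : α), a ∈ l.foldl step acc → a ∈ acc ∨ P a := by
  intro l
  induction l with
  | nil => intro acc a ha; exact Or.inl ha
  | cons x t ih =>
    intro acc a ha
    rcases ih (step acc x) a ha with hmem | hp
    · rcases hstep acc x with heq | ⟨e, hPe, heq⟩
      · rw [heq] at hmem; exact Or.inl hmem
      · rw [heq] at hmem
        rcases List.mem_cons.mp hmem with h | h
        · subst h; exact Or.inr hPe
        · exact Or.inl h
    · exact Or.inr hp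

theorem pv_walk_inv (input : List String) (endp : Option (Int × Int)) :
    ∀ (fuel : Nat) (q : List ((Int × Int) × Int)) (ix : PySem.Dict (Int × Int) Int)
      (path : List (Int × Int)),
      (∀ e ∈ q, okC input e.1) → WInv input ix path →
      WInv input (pvWalk input endp fuel q ix path).1 (pvWalk input endp fuel q ix path).2 := by
  intro fuel
  induction fuel with
  | zero => intro q ix path _ hinv; exact hinv
  | succ n ih =>
    rintro (_ | ⟨⟨pij, ind⟩, rest⟩) ix path hq hinv
    · exact hinv
    · have hok : okC input pij := hq _ (List.mem_cons_self)
      have hix' : ∀ p, (ix.insert pij ind).contains p = true → okC input p := by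
        intro p hp
        rw [PySem.Dict.contains_insert] at hp
        rcases Bool.or_eq_true_iff.mp hp with h | h
        · have : p = pij := by simpa using h
          rw [this]; exact hok
        · exact hinv.1 p h
      have hpath' : ∀ p ∈ path ++ [pij], (ix.insert pij ind).contains p = true := by
        intro p hp
        rcases List.mem_append.mp hp with h | h
        · rw [PySem.Dict.contains_insert, hinv.2 p h, Bool.or_true]
        · have : p = pij := by simpa using h
          rw [this]
          exact PySem.Dict.contains_insert_self _ _ _
      have hq' : ∀ e ∈ pvDirs.foldl
          (fun acc d =>
            if !(pvInB input (pij.1 + d.1) (pij.2 + d.2)) then acc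
            else if pvCell input (pij.1 + d.1) (pij.2 + d.2) = '#' then acc
            else if (ix.insert pij ind).contains (pij.1 + d.1, pij.2 + d.2) then acc
            else ((pij.1 + d.1, pij.2 + d.2), ind + 1) :: acc) rest,
          okC input e.1 := by
        have hstep : ∀ (acc : List ((Int × Int) × Int)) (d : Int × Int),
            (if !(pvInB input (pij.1 + d.1) (pij.2 + d.2)) then acc
             else if pvCell input (pij.1 + d.1) (pij.2 + d.2) = '#' then acc
             else if (ix.insert pij ind).contains (pij.1 + d.1, pij.2 + d.2) then acc
             else ((pij.1 + d.1, pij.2 + d.2), ind + 1) :: acc) = acc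
            ∨ ∃ e, okC input e.1 ∧
              (if !(pvInB input (pij.1 + d.1) (pij.2 + d.2)) then acc
               else if pvCell input (pij.1 + d.1) (pij.2 + d.2) = '#' then acc
               else if (ix.insert pij ind).contains (pij.1 + d.1, pij.2 + d.2) then acc
               else ((pij.1 + d.1, pij.2 + d.2), ind + 1) :: acc) = e :: acc := by
          intro acc d
          by_cases h1 : (!(pvInB input (pij.1 + d.1) (pij.2 + d.2))) = true
          · left; rw [if_pos h1]
          · by_cases h2 : pvCell input (pij.1 + d.1) (pij.2 + d.2) = '#'
            · left; rw [if_neg h1, if_pos h2]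
            · by_cases h3 : (ix.insert pij ind).contains (pij.1 + d.1, pij.2 + d.2) = true
              · left; rw [if_neg h1, if_neg h2, if_pos h3]
              · right
                refine ⟨((pij.1 + d.1, pij.2 + d.2), ind + 1), ⟨?_, h2⟩, ?_⟩
                · simpa using h1
                · rw [if_neg h1, if_neg h2, if_neg h3]
        intro e he
        rcases pv_foldl_guard (fun e => okC input e.1) _ hstep pvDirs rest e he with h | h
        · exact hq _ (List.mem_cons_of_mem _ h)
        · exact h
      simp only [pvWalk]
      by_cases hend : some pij = endp
      · rw [if_pos hend]
        exact ⟨hix', hpath'⟩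
      · rw [if_neg hend]
        exact ih _ _ _ hq' ⟨hix', hpath'⟩

-- the emission lists and the crossing indicator -----------------------------

def evA (input : List String) (ix : PySem.Dict (Int × Int) Int) (seconds : Int)
    (p : Int × Int) : List Int :=
  pvDirs.flatMap (fun dd =>
    if !(pvInB input (p.1 + dd.1) (p.2 + dd.2)) then []
    else if pvCell input (p.1 + dd.1) (p.2 + dd.2) = '.' then []
    else if !(pvInB input (p.1 + dd.1 + dd.1) (p.2 + dd.2 + dd.2)) then []
    else if pvCell input (p.1 + dd.1 + dd.1) (p.2 + dd.2 + dd.2) = '#' then []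
    else if !(ix.contains (p.1 + dd.1 + dd.1, p.2 + dd.2 + dd.2)) then []
    else if ix.getD (p.1 + dd.1 + dd.1, p.2 + dd.2 + dd.2) 0 < ix.getD p 0 then []
    else [seconds - ((ix.getD p 0 + 1) + 1
            + (seconds - ix.getD (p.1 + dd.1 + dd.1, p.2 + dd.2 + dd.2) 0))])

def evB (input : List String) (ix : PySem.Dict (Int × Int) Int) (r c : Int) :
    List (Int × Int) :=
  if pvCell input r c = '.' then []
  else
    [((r, c - 1), (r, c + 1)), ((r - 1, c), (r + 1, c))].flatMap (fun pr =>
      if ix.contains pr.1 && ix.contains pr.2 then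
        if 100 ≤ |ix.getD pr.1 0 - ix.getD pr.2 0| - 2 then
          [if ix.getD pr.1 0 < ix.getD pr.2 0 then pr.1 else pr.2]
        else []
      else [])

def gridStream (input : List String) (ix : PySem.Dict (Int × Int) Int) :
    List (Int × Int) :=
  (PySem.List.pyRange 0 (PySem.List.len input) 1).flatMap (fun r =>
    (PySem.List.pyRange 0 (PySem.List.len (pvRow input r)) 1).flatMap (fun c =>
      evB input ix r c))

-- one qualifying crossing: middle m, landing l, start p (index gap ≥ 102)
def bT (input : List String) (ix : PySem.Dict (Int × Int) Int) (p m l : Int × Int) : Int :=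
  if pvInB input m.1 m.2 = true ∧ ¬ pvCell input m.1 m.2 = '.'
      ∧ ix.contains l = true ∧ ix.getD p 0 + 102 ≤ ix.getD l 0 then 1 else 0

def bSum (input : List String) (ix : PySem.Dict (Int × Int) Int) (p : Int × Int) : Int :=
  (bT input ix p (p.1, p.2 + 1) (p.1, p.2 + 2) + bT input ix p (p.1, p.2 - 1) (p.1, p.2 - 2))
  + (bT input ix p (p.1 + 1, p.2) (p.1 + 2, p.2) + bT input ix p (p.1 - 1, p.2) (p.1 - 2, p.2))

-- A's per-direction term ----------------------------------------------------

theorem pv_perpA1 (input : List String) (ix : PySem.Dict (Int × Int) Int)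
    (Hix : ∀ q, ix.contains q = true → okC input q) (seconds : Int) (p : Int × Int)
    (mi mj li lj : Int) :
    (((if !(pvInB input mi mj) then ([] : List Int)
        else if pvCell input mi mj = '.' then []
        else if !(pvInB input li lj) then []
        else if pvCell input li lj = '#' then []
        else if !(ix.contains (li, lj)) then []
        else if ix.getD (li, lj) 0 < ix.getD p 0 then []
        else [seconds - ((ix.getD p 0 + 1) + 1
              + (seconds - ix.getD (li, lj) 0))]).countP (fun s => decide (100 ≤ s)) : Nat) : Int)
      = bT input ix p (mi, mj) (li, lj) := by
  unfold bT
  by_cases h1 : (!(pvInB input mi mj)) = true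
  · rw [if_pos h1, if_neg]
    · simp
    · rintro ⟨hb, -, -, -⟩
      rw [Bool.not_eq_true'] at h1
      rw [hb] at h1; cases h1
  · by_cases h2 : pvCell input mi mj = '.'
    · rw [if_neg h1, if_pos h2, if_neg]
      · simp
      · rintro ⟨-, hb, -, -⟩; exact hb h2
    · by_cases h3 : (!(pvInB input li lj)) = true
      · rw [if_neg h1, if_neg h2, if_pos h3, if_neg]
        · simp
        · rintro ⟨-, -, hcl, -⟩
          have := (Hix _ hcl).1
          rw [Bool.not_eq_true'] at h3
          rw [this] at h3; cases h3
      · by_cases h4 : pvCell input li lj = '#'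
        · rw [if_neg h1, if_neg h2, if_neg h3, if_pos h4, if_neg]
          · simp
          · rintro ⟨-, -, hcl, -⟩
            exact (Hix _ hcl).2 h4
        · by_cases h5 : (!(ix.contains (li, lj))) = true
          · rw [if_neg h1, if_neg h2, if_neg h3, if_neg h4, if_pos h5, if_neg]
            · simp
            · rintro ⟨-, -, hcl, -⟩
              rw [Bool.not_eq_true'] at h5
              rw [hcl] at h5; cases h5
          · by_cases h6 : ix.getD (li, lj) 0 < ix.getD p 0
            · rw [if_neg h1, if_neg h2, if_neg h3, if_neg h4, if_neg h5, if_pos h6, if_neg]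
              · simp
              · rintro ⟨-, -, -, hgap⟩; omega
            · rw [if_neg h1, if_neg h2, if_neg h3, if_neg h4, if_neg h5, if_neg h6]
              rw [List.countP_singleton]
              have hInB : pvInB input mi mj = true := by simpa using h1
              have hcl : ix.contains (li, lj) = true := by simpa using h5
              by_cases hgap : ix.getD p 0 + 102 ≤ ix.getD (li, lj) 0
              · have hcond : pvInB input mi mj = true ∧ ¬ pvCell input mi mj = '.'
                    ∧ ix.contains (li, lj) = true
                    ∧ ix.getD p 0 + 102 ≤ ix.getD (li, lj) 0 := ⟨hInB, h2, hcl, hgap⟩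
                have h100 : (100 : Int) ≤ seconds - (ix.getD p 0 + 1 + 1
                    + (seconds - ix.getD (li, lj) 0)) := by omega
                simp [hcond, h100]
              · have hcond : ¬ (pvInB input mi mj = true ∧ ¬ pvCell input mi mj = '.'
                    ∧ ix.contains (li, lj) = true
                    ∧ ix.getD p 0 + 102 ≤ ix.getD (li, lj) 0) := by
                  rintro ⟨-, -, -, hg⟩; exact hgap hg
                have h100 : ¬ (100 : Int) ≤ seconds - (ix.getD p 0 + 1 + 1
                    + (seconds - ix.getD (li, lj) 0)) := by omega
                simp [hcond, h100]

theorem pv_perpA (input : List String) (ix : PySem.Dict (Int × Int) Int)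
    (Hix : ∀ q, ix.contains q = true → okC input q) (seconds : Int) (p : Int × Int) :
    (((evA input ix seconds p).countP (fun s => decide (100 ≤ s)) : Nat) : Int)
      = bSum input ix p := by
  unfold evA pvDirs
  simp only [List.flatMap_cons, List.flatMap_nil, List.append_nil, List.countP_append]
  push_cast
  rw [pv_perpA1 input ix Hix seconds p (p.1 + 0) (p.2 + 1) (p.1 + 0 + 0) (p.2 + 1 + 1),
      pv_perpA1 input ix Hix seconds p (p.1 + 0) (p.2 + -1) (p.1 + 0 + 0) (p.2 + -1 + -1),
      pv_perpA1 input ix Hix seconds p (p.1 + 1) (p.2 + 0) (p.1 + 1 + 1) (p.2 + 0 + 0),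
      pv_perpA1 input ix Hix seconds p (p.1 + -1) (p.2 + 0) (p.1 + -1 + -1) (p.2 + 0 + 0)]
  rw [show ((p.1 + 0 : Int), (p.2 + 1 : Int)) = (p.1, p.2 + 1) from by
        rw [Prod.mk.injEq]; exact ⟨by ring, rfl⟩,
      show ((p.1 + 0 + 0 : Int), (p.2 + 1 + 1 : Int)) = (p.1, p.2 + 2) from by
        rw [Prod.mk.injEq]; exact ⟨by ring, by ring⟩,
      show ((p.1 + 0 : Int), (p.2 + -1 : Int)) = (p.1, p.2 - 1) from by
        rw [Prod.mk.injEq]; exact ⟨by ring, by ring⟩,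
      show ((p.1 + 0 + 0 : Int), (p.2 + -1 + -1 : Int)) = (p.1, p.2 - 2) from by
        rw [Prod.mk.injEq]; exact ⟨by ring, by ring⟩,
      show ((p.1 + 1 : Int), (p.2 + 0 : Int)) = (p.1 + 1, p.2) from by
        rw [Prod.mk.injEq]; exact ⟨rfl, by ring⟩,
      show ((p.1 + 1 + 1 : Int), (p.2 + 0 + 0 : Int)) = (p.1 + 2, p.2) from by
        rw [Prod.mk.injEq]; exact ⟨by ring, by ring⟩,
      show ((p.1 + -1 : Int), (p.2 + 0 : Int)) = (p.1 - 1, p.2) from by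
        rw [Prod.mk.injEq]; exact ⟨by ring, by ring⟩,
      show ((p.1 + -1 + -1 : Int), (p.2 + 0 + 0 : Int)) = (p.1 - 2, p.2) from by
        rw [Prod.mk.injEq]; exact ⟨by ring, by ring⟩]
  unfold bSum
  ring

-- B's per-cell decomposition ------------------------------------------------

theorem pv_dterm_dot (input : List String) (ix : PySem.Dict (Int × Int) Int)
    (p m l : Int × Int) (r c : Int) (hdot : pvCell input r c = '.') :
    (if (r, c) = m then bT input ix p m l else 0) = 0 := by
  split_ifs with h2
  · unfold bT
    rw [if_neg]
    rintro ⟨-, hne, -, -⟩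
    rw [← h2] at hne
    exact hne hdot
  · rfl

theorem pv_cnt_ne (p q : Int × Int) (h : ¬ q = p) : List.count p [q] = 0 := by
  rw [List.count_eq_zero]
  intro hmem
  exact h (List.mem_singleton.mp hmem).symm

theorem pv_pair_ne_snd (p : Int × Int) (b : Int) (hb : ¬ b = p.2) :
    ¬ ((p.1 : Int), b) = p := by
  intro h
  have h2 := h.trans Prod.mk.eta.symm
  rw [Prod.mk.injEq] at h2
  exact hb h2.2

theorem pv_pair_ne_fst (p : Int × Int) (a : Int) (ha : ¬ a = p.1) :
    ¬ ((a : Int), p.2) = p := by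
  intro h
  have h2 := h.trans Prod.mk.eta.symm
  rw [Prod.mk.injEq] at h2
  exact ha h2.1

theorem pv_bT_one (input : List String) (ix : PySem.Dict (Int × Int) Int)
    (p : Int × Int) (a b : Int) (l : Int × Int)
    (h1 : pvInB input a b = true) (h2 : ¬ pvCell input a b = '.')
    (h3 : ix.contains l = true) (h4 : ix.getD p 0 + 102 ≤ ix.getD l 0) :
    bT input ix p (a, b) l = 1 := by
  unfold bT
  rw [if_pos ⟨h1, h2, h3, h4⟩]

theorem pv_bT_zero_nc (input : List String) (ix : PySem.Dict (Int × Int) Int)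
    (p m l : Int × Int) (h : ¬ ix.contains l = true) :
    bT input ix p m l = 0 := by
  unfold bT
  rw [if_neg]
  rintro ⟨-, -, hg, -⟩
  exact h hg

theorem pv_bT_zero_gap (input : List String) (ix : PySem.Dict (Int × Int) Int)
    (p m l : Int × Int) (h : ¬ ix.getD p 0 + 102 ≤ ix.getD l 0) :
    bT input ix p m l = 0 := by
  unfold bT
  rw [if_neg]
  rintro ⟨-, -, -, hg⟩
  exact h hg

theorem pv_axis_h (input : List String) (ix : PySem.Dict (Int × Int) Int)
    (p : Int × Int) (hp : ix.contains p = true) (r c : Int)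
    (hin : pvInB input r c = true) (hdot : ¬ pvCell input r c = '.') :
    (((if ix.contains (r, c - 1) && ix.contains (r, c + 1) then
        (if 100 ≤ |ix.getD (r, c - 1) 0 - ix.getD (r, c + 1) 0| - 2 then
          [if ix.getD (r, c - 1) 0 < ix.getD (r, c + 1) 0 then (r, c - 1) else (r, c + 1)]
        else [])
      else ([] : List (Int × Int))).count p : Nat) : Int)
    = (if (r, c) = (p.1, p.2 + 1) then bT input ix p (p.1, p.2 + 1) (p.1, p.2 + 2) else 0)
      + (if (r, c) = (p.1, p.2 - 1) then bT input ix p (p.1, p.2 - 1) (p.1, p.2 - 2) else 0) := by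
  by_cases hA : (r, c) = ((p.1 : Int), p.2 + 1)
  · rw [Prod.mk.injEq] at hA
    obtain ⟨hr, hc⟩ := hA
    subst hr; subst hc
    rw [if_pos (c := ((p.1 : Int), p.2 + 1) = (p.1, p.2 + 1)) rfl,
        if_neg (c := ((p.1 : Int), p.2 + 1) = (p.1, p.2 - 1))
          (by intro h; rw [Prod.mk.injEq] at h; omega), add_zero]
    rw [show ((p.1 : Int), p.2 + 1 - 1) = p from by
          rw [show (p.2 + 1 - 1 : Int) = p.2 by ring],
        show ((p.1 : Int), p.2 + 1 + 1) = (p.1, p.2 + 2) from by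
          rw [Prod.mk.injEq]; exact ⟨rfl, by ring⟩,
        hp]
    simp only [Bool.true_and]
    by_cases hcl : ix.contains (p.1, p.2 + 2) = true
    · rw [hcl, if_pos (c := (true = true)) rfl]
      by_cases hgap : (100 : Int) ≤ |ix.getD p 0 - ix.getD (p.1, p.2 + 2) 0| - 2
      · rw [if_pos (c := (100 : Int) ≤ |ix.getD p 0 - ix.getD (p.1, p.2 + 2) 0| - 2) hgap]
        rcases abs_cases (ix.getD p 0 - ix.getD (p.1, p.2 + 2) 0) with ⟨he, hs⟩ | ⟨he, hs⟩ <;>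
          rw [he] at hgap
        · rw [if_neg (c := ix.getD p 0 < ix.getD (p.1, p.2 + 2) 0) (by omega),
              pv_cnt_ne p (p.1, p.2 + 2) (pv_pair_ne_snd p (p.2 + 2) (by omega)),
              pv_bT_zero_gap input ix p (p.1, p.2 + 1) (p.1, p.2 + 2) (by omega)]
          simp
        · rw [if_pos (c := ix.getD p 0 < ix.getD (p.1, p.2 + 2) 0) (by omega),
              pv_bT_one input ix p p.1 (p.2 + 1) (p.1, p.2 + 2) hin hdot hcl (by omega)]
          simp
      · rw [if_neg (c := (100 : Int) ≤ |ix.getD p 0 - ix.getD (p.1, p.2 + 2) 0| - 2) hgap,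
            pv_bT_zero_gap input ix p (p.1, p.2 + 1) (p.1, p.2 + 2) (by
              rcases abs_cases (ix.getD p 0 - ix.getD (p.1, p.2 + 2) 0) with ⟨he, hs⟩ | ⟨he, hs⟩ <;>
                rw [he] at hgap <;> omega)]
        simp
    · have hclf : ix.contains (p.1, p.2 + 2) = false := by
        cases h : ix.contains (p.1, p.2 + 2)
        · rfl
        · exact absurd h hcl
      rw [hclf, if_neg (c := (false = true)) (by simp),
          pv_bT_zero_nc input ix p (p.1, p.2 + 1) (p.1, p.2 + 2) hcl]
      simp
  · by_cases hB : (r, c) = ((p.1 : Int), p.2 - 1)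
    · rw [if_neg (c := (r, c) = ((p.1 : Int), p.2 + 1)) hA]
      rw [Prod.mk.injEq] at hB
      obtain ⟨hr, hc⟩ := hB
      subst hr; subst hc
      rw [if_pos (c := ((p.1 : Int), p.2 - 1) = (p.1, p.2 - 1)) rfl, zero_add]
      rw [show ((p.1 : Int), p.2 - 1 - 1) = (p.1, p.2 - 2) from by
            rw [Prod.mk.injEq]; exact ⟨rfl, by ring⟩,
          show ((p.1 : Int), p.2 - 1 + 1) = p from by
            rw [show (p.2 - 1 + 1 : Int) = p.2 by ring],
          hp]
      rw [Bool.and_true]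
      by_cases hcl : ix.contains (p.1, p.2 - 2) = true
      · rw [hcl, if_pos (c := (true = true)) rfl]
        by_cases hgap : (100 : Int) ≤ |ix.getD (p.1, p.2 - 2) 0 - ix.getD p 0| - 2
        · rw [if_pos (c := (100 : Int) ≤ |ix.getD (p.1, p.2 - 2) 0 - ix.getD p 0| - 2) hgap]
          rcases abs_cases (ix.getD (p.1, p.2 - 2) 0 - ix.getD p 0) with ⟨he, hs⟩ | ⟨he, hs⟩ <;>
            rw [he] at hgap
          · rw [if_neg (c := ix.getD (p.1, p.2 - 2) 0 < ix.getD p 0) (by omega),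
                pv_bT_one input ix p p.1 (p.2 - 1) (p.1, p.2 - 2) hin hdot hcl (by omega)]
            simp
          · rw [if_pos (c := ix.getD (p.1, p.2 - 2) 0 < ix.getD p 0) (by omega),
                pv_cnt_ne p (p.1, p.2 - 2) (pv_pair_ne_snd p (p.2 - 2) (by omega)),
                pv_bT_zero_gap input ix p (p.1, p.2 - 1) (p.1, p.2 - 2) (by omega)]
            simp
        · rw [if_neg (c := (100 : Int) ≤ |ix.getD (p.1, p.2 - 2) 0 - ix.getD p 0| - 2) hgap,
              pv_bT_zero_gap input ix p (p.1, p.2 - 1) (p.1, p.2 - 2) (by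
                rcases abs_cases (ix.getD (p.1, p.2 - 2) 0 - ix.getD p 0) with ⟨he, hs⟩ | ⟨he, hs⟩ <;>
                  rw [he] at hgap <;> omega)]
          simp
      · have hclf : ix.contains (p.1, p.2 - 2) = false := by
          cases h : ix.contains (p.1, p.2 - 2)
          · rfl
          · exact absurd h hcl
        rw [hclf, if_neg (c := (false = true)) (by simp),
            pv_bT_zero_nc input ix p (p.1, p.2 - 1) (p.1, p.2 - 2) hcl]
        simp
    · rw [if_neg (c := (r, c) = ((p.1 : Int), p.2 + 1)) hA,
          if_neg (c := (r, c) = ((p.1 : Int), p.2 - 1)) hB]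
      have hne1 : ¬ p = ((r : Int), c - 1) := by
        intro h
        apply hA
        have h2 := Prod.mk.eta.symm.trans h
        rw [Prod.mk.injEq] at h2 ⊢
        omega
      have hne2 : ¬ p = ((r : Int), c + 1) := by
        intro h
        apply hB
        have h2 := Prod.mk.eta.symm.trans h
        rw [Prod.mk.injEq] at h2 ⊢
        omega
      have hz : (if ix.contains (r, c - 1) && ix.contains (r, c + 1) then
          (if 100 ≤ |ix.getD (r, c - 1) 0 - ix.getD (r, c + 1) 0| - 2 then
            [if ix.getD (r, c - 1) 0 < ix.getD (r, c + 1) 0 then (r, c - 1) else (r, c + 1)]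
          else [])
        else ([] : List (Int × Int))).count p = 0 := by
        rw [List.count_eq_zero]
        intro hmem
        split_ifs at hmem <;>
          first
          | exact hne1 (List.mem_singleton.mp hmem)
          | exact hne2 (List.mem_singleton.mp hmem)
          | simp at hmem
      rw [hz]
      simp

theorem pv_axis_v (input : List String) (ix : PySem.Dict (Int × Int) Int)
    (p : Int × Int) (hp : ix.contains p = true) (r c : Int)
    (hin : pvInB input r c = true) (hdot : ¬ pvCell input r c = '.') :
    (((if ix.contains (r - 1, c) && ix.contains (r + 1, c) then
        (if 100 ≤ |ix.getD (r - 1, c) 0 - ix.getD (r + 1, c) 0| - 2 then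
          [if ix.getD (r - 1, c) 0 < ix.getD (r + 1, c) 0 then (r - 1, c) else (r + 1, c)]
        else [])
      else ([] : List (Int × Int))).count p : Nat) : Int)
    = (if (r, c) = (p.1 + 1, p.2) then bT input ix p (p.1 + 1, p.2) (p.1 + 2, p.2) else 0)
      + (if (r, c) = (p.1 - 1, p.2) then bT input ix p (p.1 - 1, p.2) (p.1 - 2, p.2) else 0) := by
  by_cases hA : (r, c) = ((p.1 + 1 : Int), p.2)
  · rw [Prod.mk.injEq] at hA
    obtain ⟨hr, hc⟩ := hA
    subst hr; subst hc
    rw [if_pos (c := ((p.1 + 1 : Int), p.2) = (p.1 + 1, p.2)) rfl,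
        if_neg (c := ((p.1 + 1 : Int), p.2) = (p.1 - 1, p.2))
          (by intro h; rw [Prod.mk.injEq] at h; omega), add_zero]
    rw [show ((p.1 + 1 - 1 : Int), p.2) = p from by
          rw [show (p.1 + 1 - 1 : Int) = p.1 by ring],
        show ((p.1 + 1 + 1 : Int), p.2) = (p.1 + 2, p.2) from by
          rw [Prod.mk.injEq]; exact ⟨by ring, rfl⟩,
        hp]
    simp only [Bool.true_and]
    by_cases hcl : ix.contains (p.1 + 2, p.2) = true
    · rw [hcl, if_pos (c := (true = true)) rfl]
      by_cases hgap : (100 : Int) ≤ |ix.getD p 0 - ix.getD (p.1 + 2, p.2) 0| - 2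
      · rw [if_pos (c := (100 : Int) ≤ |ix.getD p 0 - ix.getD (p.1 + 2, p.2) 0| - 2) hgap]
        rcases abs_cases (ix.getD p 0 - ix.getD (p.1 + 2, p.2) 0) with ⟨he, hs⟩ | ⟨he, hs⟩ <;>
          rw [he] at hgap
        · rw [if_neg (c := ix.getD p 0 < ix.getD (p.1 + 2, p.2) 0) (by omega),
              pv_cnt_ne p (p.1 + 2, p.2) (pv_pair_ne_fst p (p.1 + 2) (by omega)),
              pv_bT_zero_gap input ix p (p.1 + 1, p.2) (p.1 + 2, p.2) (by omega)]
          simp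
        · rw [if_pos (c := ix.getD p 0 < ix.getD (p.1 + 2, p.2) 0) (by omega),
              pv_bT_one input ix p (p.1 + 1) p.2 (p.1 + 2, p.2) hin hdot hcl (by omega)]
          simp
      · rw [if_neg (c := (100 : Int) ≤ |ix.getD p 0 - ix.getD (p.1 + 2, p.2) 0| - 2) hgap,
            pv_bT_zero_gap input ix p (p.1 + 1, p.2) (p.1 + 2, p.2) (by
              rcases abs_cases (ix.getD p 0 - ix.getD (p.1 + 2, p.2) 0) with ⟨he, hs⟩ | ⟨he, hs⟩ <;>
                rw [he] at hgap <;> omega)]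
        simp
    · have hclf : ix.contains (p.1 + 2, p.2) = false := by
        cases h : ix.contains (p.1 + 2, p.2)
        · rfl
        · exact absurd h hcl
      rw [hclf, if_neg (c := (false = true)) (by simp),
          pv_bT_zero_nc input ix p (p.1 + 1, p.2) (p.1 + 2, p.2) hcl]
      simp
  · by_cases hB : (r, c) = ((p.1 - 1 : Int), p.2)
    · rw [if_neg (c := (r, c) = ((p.1 + 1 : Int), p.2)) hA]
      rw [Prod.mk.injEq] at hB
      obtain ⟨hr, hc⟩ := hB
      subst hr; subst hc
      rw [if_pos (c := ((p.1 - 1 : Int), p.2) = (p.1 - 1, p.2)) rfl, zero_add]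
      rw [show ((p.1 - 1 - 1 : Int), p.2) = (p.1 - 2, p.2) from by
            rw [Prod.mk.injEq]; exact ⟨by ring, rfl⟩,
          show ((p.1 - 1 + 1 : Int), p.2) = p from by
            rw [show (p.1 - 1 + 1 : Int) = p.1 by ring],
          hp]
      rw [Bool.and_true]
      by_cases hcl : ix.contains (p.1 - 2, p.2) = true
      · rw [hcl, if_pos (c := (true = true)) rfl]
        by_cases hgap : (100 : Int) ≤ |ix.getD (p.1 - 2, p.2) 0 - ix.getD p 0| - 2
        · rw [if_pos (c := (100 : Int) ≤ |ix.getD (p.1 - 2, p.2) 0 - ix.getD p 0| - 2) hgap]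
          rcases abs_cases (ix.getD (p.1 - 2, p.2) 0 - ix.getD p 0) with ⟨he, hs⟩ | ⟨he, hs⟩ <;>
            rw [he] at hgap
          · rw [if_neg (c := ix.getD (p.1 - 2, p.2) 0 < ix.getD p 0) (by omega),
                pv_bT_one input ix p (p.1 - 1) p.2 (p.1 - 2, p.2) hin hdot hcl (by omega)]
            simp
          · rw [if_pos (c := ix.getD (p.1 - 2, p.2) 0 < ix.getD p 0) (by omega),
                pv_cnt_ne p (p.1 - 2, p.2) (pv_pair_ne_fst p (p.1 - 2) (by omega)),
                pv_bT_zero_gap input ix p (p.1 - 1, p.2) (p.1 - 2, p.2) (by omega)]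
            simp
        · rw [if_neg (c := (100 : Int) ≤ |ix.getD (p.1 - 2, p.2) 0 - ix.getD p 0| - 2) hgap,
              pv_bT_zero_gap input ix p (p.1 - 1, p.2) (p.1 - 2, p.2) (by
                rcases abs_cases (ix.getD (p.1 - 2, p.2) 0 - ix.getD p 0) with ⟨he, hs⟩ | ⟨he, hs⟩ <;>
                  rw [he] at hgap <;> omega)]
          simp
      · have hclf : ix.contains (p.1 - 2, p.2) = false := by
          cases h : ix.contains (p.1 - 2, p.2)
          · rfl
          · exact absurd h hcl
        rw [hclf, if_neg (c := (false = true)) (by simp),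
            pv_bT_zero_nc input ix p (p.1 - 1, p.2) (p.1 - 2, p.2) hcl]
        simp
    · rw [if_neg (c := (r, c) = ((p.1 + 1 : Int), p.2)) hA,
          if_neg (c := (r, c) = ((p.1 - 1 : Int), p.2)) hB]
      have hne1 : ¬ p = ((r - 1 : Int), c) := by
        intro h
        apply hA
        have h2 := Prod.mk.eta.symm.trans h
        rw [Prod.mk.injEq] at h2 ⊢
        omega
      have hne2 : ¬ p = ((r + 1 : Int), c) := by
        intro h
        apply hB
        have h2 := Prod.mk.eta.symm.trans h
        rw [Prod.mk.injEq] at h2 ⊢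
        omega
      have hz : (if ix.contains (r - 1, c) && ix.contains (r + 1, c) then
          (if 100 ≤ |ix.getD (r - 1, c) 0 - ix.getD (r + 1, c) 0| - 2 then
            [if ix.getD (r - 1, c) 0 < ix.getD (r + 1, c) 0 then (r - 1, c) else (r + 1, c)]
          else [])
        else ([] : List (Int × Int))).count p = 0 := by
        rw [List.count_eq_zero]
        intro hmem
        split_ifs at hmem <;>
          first
          | exact hne1 (List.mem_singleton.mp hmem)
          | exact hne2 (List.mem_singleton.mp hmem)
          | simp at hmem
      rw [hz]
      simp

theorem pv_cellpt (input : List String) (ix : PySem.Dict (Int × Int) Int)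
    (p : Int × Int) (hp : ix.contains p = true) (r c : Int)
    (hrb : 0 ≤ r ∧ r < PySem.List.len input)
    (hcb : 0 ≤ c ∧ c < PySem.List.len (pvRow input r)) :
    (((evB input ix r c).count p : Nat) : Int)
    = ((if (r, c) = (p.1, p.2 + 1) then bT input ix p (p.1, p.2 + 1) (p.1, p.2 + 2) else 0)
        + (if (r, c) = (p.1, p.2 - 1) then bT input ix p (p.1, p.2 - 1) (p.1, p.2 - 2) else 0))
      + ((if (r, c) = (p.1 + 1, p.2) then bT input ix p (p.1 + 1, p.2) (p.1 + 2, p.2) else 0)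
        + (if (r, c) = (p.1 - 1, p.2) then bT input ix p (p.1 - 1, p.2) (p.1 - 2, p.2) else 0)) := by
  have hin : pvInB input r c = true := by
    simp only [pvInB, Bool.and_eq_true, decide_eq_true_eq]
    exact ⟨⟨⟨hrb.1, hrb.2⟩, hcb.1⟩, hcb.2⟩
  unfold evB
  by_cases hdot : pvCell input r c = '.'
  · rw [if_pos hdot]
    rw [pv_dterm_dot input ix p _ _ r c hdot, pv_dterm_dot input ix p _ _ r c hdot,
        pv_dterm_dot input ix p _ _ r c hdot, pv_dterm_dot input ix p _ _ r c hdot]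
    simp
  · rw [if_neg hdot]
    simp only [List.flatMap_cons, List.flatMap_nil, List.append_nil, List.count_append]
    push_cast
    rw [pv_axis_h input ix p hp r c hin hdot, pv_axis_v input ix p hp r c hin hdot]

-- summing the deltas over the grid ------------------------------------------

theorem pv_delta (input : List String) (a b v : Int) :
    ((PySem.List.pyRange 0 (PySem.List.len input) 1).map (fun r =>
       ((PySem.List.pyRange 0 (PySem.List.len (pvRow input r)) 1).map (fun c =>
          if (r, c) = (a, b) then v else 0)).sum)).sum
    = if pvInB input a b = true then v else 0 := by
  have hinner : ∀ r : Int,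
      ((PySem.List.pyRange 0 (PySem.List.len (pvRow input r)) 1).map (fun c =>
          if (r, c) = (a, b) then v else 0)).sum
      = if r = a then
          (if 0 ≤ b ∧ b < PySem.List.len (pvRow input a) then v else 0)
        else 0 := by
    intro r
    by_cases hra : r = a
    · subst hra
      rw [if_pos rfl]
      have hfun : ∀ c : Int, (if ((r : Int), c) = (r, b) then v else 0) = if c = b then v else 0 := by
        intro c
        by_cases hcb : c = b
        · rw [if_pos hcb, if_pos (by rw [hcb])]
        · rw [if_neg hcb, if_neg (by intro h; exact hcb (congrArg Prod.snd h))]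
      rw [List.map_congr_left (fun c _ => hfun c),
          pv_sum_indicator b v _ (PySem.List.nodup_pyRange_one _ _)]
      by_cases hmem : b ∈ PySem.List.pyRange 0 (PySem.List.len (pvRow input r)) 1
      · rw [if_pos hmem, if_pos]
        rcases PySem.List.mem_pyRange_one.mp hmem with ⟨h1, h2⟩
        exact ⟨h1, h2⟩
      · rw [if_neg hmem, if_neg]
        intro ⟨h1, h2⟩
        exact hmem (PySem.List.mem_pyRange_one.mpr ⟨h1, h2⟩)
    · rw [if_neg hra]
      have hfun : ∀ c : Int, (if (r, c) = (a, b) then v else 0) = (0 : Int) := by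
        intro c
        rw [if_neg]
        intro h
        exact hra (congrArg Prod.fst h)
      rw [List.map_congr_left (fun c _ => hfun c), pv_sum_zero]
  rw [List.map_congr_left (fun r _ => hinner r),
      pv_sum_indicator a _ _ (PySem.List.nodup_pyRange_one _ _)]
  by_cases hmem : a ∈ PySem.List.pyRange 0 (PySem.List.len input) 1
  · rcases PySem.List.mem_pyRange_one.mp hmem with ⟨h1, h2⟩
    rw [if_pos hmem]
    by_cases hb : 0 ≤ b ∧ b < PySem.List.len (pvRow input a)
    · rw [if_pos hb, if_pos]
      simp only [pvInB, Bool.and_eq_true, decide_eq_true_eq]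
      exact ⟨⟨⟨h1, h2⟩, hb.1⟩, hb.2⟩
    · rw [if_neg hb, if_neg]
      simp only [pvInB, Bool.and_eq_true, decide_eq_true_eq]
      rintro ⟨⟨⟨-, -⟩, hb1⟩, hb2⟩
      exact hb ⟨hb1, hb2⟩
  · rw [if_neg hmem, if_neg]
    simp only [pvInB, Bool.and_eq_true, decide_eq_true_eq]
    rintro ⟨⟨⟨h1, h2⟩, -⟩, -⟩
    exact hmem (PySem.List.mem_pyRange_one.mpr ⟨h1, h2⟩)

theorem pv_bT_absorb (input : List String) (ix : PySem.Dict (Int × Int) Int)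
    (p : Int × Int) (a b : Int) (l : Int × Int) :
    (if pvInB input a b = true then bT input ix p (a, b) l else 0) = bT input ix p (a, b) l := by
  by_cases h : pvInB input a b = true
  · rw [if_pos h]
  · rw [if_neg h]
    unfold bT
    rw [if_neg]
    rintro ⟨hb, -, -, -⟩
    exact h hb

theorem pv_perpB (input : List String) (ix : PySem.Dict (Int × Int) Int)
    (_Hix : ∀ q, ix.contains q = true → okC input q) (p : Int × Int)
    (hp : ix.contains p = true) :
    (((gridStream input ix).count p : Nat) : Int) = bSum input ix p := by
  have h1 : (((gridStream input ix).count p : Nat) : Int)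
      = ((PySem.List.pyRange 0 (PySem.List.len input) 1).map (fun r =>
          ((PySem.List.pyRange 0 (PySem.List.len (pvRow input r)) 1).map (fun c =>
             (((evB input ix r c).count p : Nat) : Int))).sum)).sum := by
    unfold gridStream
    rw [List.count_flatMap, Nat.cast_list_sum, List.map_map]
    apply congrArg List.sum
    apply List.map_congr_left
    intro r _
    simp only [Function.comp]
    rw [List.count_flatMap, Nat.cast_list_sum, List.map_map]
    rfl
  rw [h1]
  have h2 : ((PySem.List.pyRange 0 (PySem.List.len input) 1).map (fun r =>
          ((PySem.List.pyRange 0 (PySem.List.len (pvRow input r)) 1).map (fun c =>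
             (((evB input ix r c).count p : Nat) : Int))).sum)).sum
      = ((PySem.List.pyRange 0 (PySem.List.len input) 1).map (fun r =>
          ((PySem.List.pyRange 0 (PySem.List.len (pvRow input r)) 1).map (fun c =>
            ((if (r, c) = (p.1, p.2 + 1) then bT input ix p (p.1, p.2 + 1) (p.1, p.2 + 2) else 0)
              + (if (r, c) = (p.1, p.2 - 1) then bT input ix p (p.1, p.2 - 1) (p.1, p.2 - 2) else 0))
            + ((if (r, c) = (p.1 + 1, p.2) then bT input ix p (p.1 + 1, p.2) (p.1 + 2, p.2) else 0)
              + (if (r, c) = (p.1 - 1, p.2) then bT input ix p (p.1 - 1, p.2) (p.1 - 2, p.2) else 0)))).sum)).sum := by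
    apply congrArg List.sum
    apply List.map_congr_left
    intro r hr
    apply congrArg List.sum
    apply List.map_congr_left
    intro c hc
    exact pv_cellpt input ix p hp r c
      (PySem.List.mem_pyRange_one.mp hr) (PySem.List.mem_pyRange_one.mp hc)
  rw [h2]
  -- split the sums into the four delta sums
  have hsplit : ∀ (l : List Int) (f g h k : Int → Int),
      (l.map (fun c => (f c + g c) + (h c + k c))).sum
        = ((l.map f).sum + (l.map g).sum) + ((l.map h).sum + (l.map k).sum) := by
    intro l f g h k
    rw [PySem.List.sum_map_add_int, PySem.List.sum_map_add_int, PySem.List.sum_map_add_int]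
  have h3 : ∀ r : Int,
      ((PySem.List.pyRange 0 (PySem.List.len (pvRow input r)) 1).map (fun c =>
        ((if (r, c) = (p.1, p.2 + 1) then bT input ix p (p.1, p.2 + 1) (p.1, p.2 + 2) else 0)
          + (if (r, c) = (p.1, p.2 - 1) then bT input ix p (p.1, p.2 - 1) (p.1, p.2 - 2) else 0))
        + ((if (r, c) = (p.1 + 1, p.2) then bT input ix p (p.1 + 1, p.2) (p.1 + 2, p.2) else 0)
          + (if (r, c) = (p.1 - 1, p.2) then bT input ix p (p.1 - 1, p.2) (p.1 - 2, p.2) else 0)))).sum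
      = (((PySem.List.pyRange 0 (PySem.List.len (pvRow input r)) 1).map (fun c =>
            if (r, c) = (p.1, p.2 + 1) then bT input ix p (p.1, p.2 + 1) (p.1, p.2 + 2) else 0)).sum
          + ((PySem.List.pyRange 0 (PySem.List.len (pvRow input r)) 1).map (fun c =>
            if (r, c) = (p.1, p.2 - 1) then bT input ix p (p.1, p.2 - 1) (p.1, p.2 - 2) else 0)).sum)
        + (((PySem.List.pyRange 0 (PySem.List.len (pvRow input r)) 1).map (fun c =>
            if (r, c) = (p.1 + 1, p.2) then bT input ix p (p.1 + 1, p.2) (p.1 + 2, p.2) else 0)).sum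
          + ((PySem.List.pyRange 0 (PySem.List.len (pvRow input r)) 1).map (fun c =>
            if (r, c) = (p.1 - 1, p.2) then bT input ix p (p.1 - 1, p.2) (p.1 - 2, p.2) else 0)).sum) := by
    intro r
    exact hsplit _ _ _ _ _
  rw [List.map_congr_left (fun r _ => h3 r), hsplit]
  rw [pv_delta input p.1 (p.2 + 1) _, pv_delta input p.1 (p.2 - 1) _,
      pv_delta input (p.1 + 1) p.2 _, pv_delta input (p.1 - 1) p.2 _]
  rw [pv_bT_absorb, pv_bT_absorb, pv_bT_absorb, pv_bT_absorb]
  rfl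

-- assembling each side ------------------------------------------------------

theorem pv_counter_items_sum (xs : List Int) :
    (PySem.Dict.counter xs).items.foldl
        (fun a kv => if 100 ≤ kv.1 then a + kv.2 else a) 0
      = ((xs.countP (fun s => decide (100 ≤ s)) : Nat) : Int) := by
  rw [PySem.Dict.items_counter, List.foldl_map]
  have hfun : (fun (a : Int) (k : Int) =>
        if 100 ≤ (k, (xs.count k : Int)).1 then a + (k, (xs.count k : Int)).2 else a)
      = fun a k => a + (if (100:Int) ≤ k then (xs.count k : Int) else 0) := by
    funext a k
    by_cases h : (100:Int) ≤ k <;> simp [h]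
  rw [hfun, PySem.List.foldl_add, zero_add]
  exact pv_sumcount (fun k => (100:Int) ≤ k) xs _ (PySem.Set.nodup_ofList _)
    (fun x hx => by simpa [PySem.Set.mem_ofList] using hx)

theorem pv_A_side (input : List String) (ix : PySem.Dict (Int × Int) Int)
    (path : List (Int × Int)) (seconds : Int) :
    (path.foldl (fun d p =>
        pvDirs.foldl (fun d dd =>
          if !(pvInB input (p.1 + dd.1) (p.2 + dd.2)) then d
          else if pvCell input (p.1 + dd.1) (p.2 + dd.2) = '.' then d
          else if !(pvInB input (p.1 + dd.1 + dd.1) (p.2 + dd.2 + dd.2)) then d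
          else if pvCell input (p.1 + dd.1 + dd.1) (p.2 + dd.2 + dd.2) = '#' then d
          else if !(ix.contains (p.1 + dd.1 + dd.1, p.2 + dd.2 + dd.2)) then d
          else if ix.getD (p.1 + dd.1 + dd.1, p.2 + dd.2 + dd.2) 0 < ix.getD p 0 then d
          else d.modify (seconds - ((ix.getD p 0 + 1) + 1
                + (seconds - ix.getD (p.1 + dd.1 + dd.1, p.2 + dd.2 + dd.2) 0))) 0 (· + 1)) d)
      PySem.Dict.empty)
    = PySem.Dict.counter (path.flatMap (evA input ix seconds)) := by
  rw [PySem.Dict.counter_eq_foldl, ← pv_foldl_flatMap]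
  apply PySem.List.foldl_congr_mem
  intro acc p _
  unfold evA
  rw [← pv_foldl_flatMap]
  apply PySem.List.foldl_congr_mem
  intro acc2 dd _
  split_ifs <;> rfl

theorem pv_B_side (input : List String) (ix : PySem.Dict (Int × Int) Int) :
    ((PySem.List.pyRange 0 (PySem.List.len input) 1).foldl (fun d r =>
      (PySem.List.pyRange 0 (PySem.List.len (pvRow input r)) 1).foldl (fun d c =>
        if pvCell input r c = '.' then d
        else
          [((r, c - 1), (r, c + 1)), ((r - 1, c), (r + 1, c))].foldl (fun d pr =>
            if ix.contains pr.1 && ix.contains pr.2 then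
              if 100 ≤ |ix.getD pr.1 0 - ix.getD pr.2 0| - 2 then
                d.modify (if ix.getD pr.1 0 < ix.getD pr.2 0 then pr.1 else pr.2) 0 (· + 1)
              else d
            else d) d) d) PySem.Dict.empty)
    = PySem.Dict.counter (gridStream input ix) := by
  rw [PySem.Dict.counter_eq_foldl]
  unfold gridStream
  rw [← pv_foldl_flatMap]
  apply PySem.List.foldl_congr_mem
  intro acc r _
  rw [← pv_foldl_flatMap]
  apply PySem.List.foldl_congr_mem
  intro acc2 c _
  unfold evB
  by_cases hdot : pvCell input r c = '.'
  · simp [hdot]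
  · rw [if_neg hdot, if_neg hdot]
    rw [← pv_foldl_flatMap]
    apply PySem.List.foldl_congr_mem
    intro acc3 pr _
    split_ifs <;> rfl

-- ===== VERDICT (by name: the statement is the Claim_ definition above) =====
theorem sln1_spec : Claim_equal_sln1 := by
  unfold Claim_equal_sln1
  intro input hdom hpre
  unfold Spec_sln1
  obtain ⟨st, hst⟩ := pv_scan_exists input hpre
  have hS := pv_scan_some input st hst
  have hInv : WInv input
      (pvWalk input (pvFindSE input).2 (4 * pvSize input + 8) [(st, 0)] PySem.Dict.empty []).1
      (pvWalk input (pvFindSE input).2 (4 * pvSize input + 8) [(st, 0)] PySem.Dict.empty []).2 := by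
    apply pv_walk_inv
    · intro e he
      have : e = (st, 0) := by simpa using he
      rw [this]
      exact ⟨hS.1, by rw [hS.2]; decide⟩
    · constructor
      · intro p hcp
        rw [PySem.Dict.contains_empty] at hcp
        cases hcp
      · intro p hp
        cases hp
  set ix := (pvWalk input (pvFindSE input).2 (4 * pvSize input + 8) [(st, 0)] PySem.Dict.empty []).1 with hix
  set path := (pvWalk input (pvFindSE input).2 (4 * pvSize input + 8) [(st, 0)] PySem.Dict.empty []).2 with hpath
  show sln1 input = sln1_alt input
  simp only [sln1, sln1_alt, hst]
  simp only [← hix, ← hpath]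
  rw [pv_A_side input ix path (PySem.List.len path - 1), pv_B_side input ix]
  rw [pv_counter_items_sum]
  rw [List.countP_flatMap]
  rw [PySem.List.foldl_add, zero_add]
  rw [Nat.cast_list_sum, List.map_map]
  apply congrArg List.sum
  apply List.map_congr_left
  intro p hpmem
  have hp : ix.contains p = true := hInv.2 p hpmem
  simp only [Function.comp]
  rw [pv_perpA input ix hInv.1 (PySem.List.len path - 1) p]
  rw [PySem.Dict.getD_counter]
  rw [pv_perpB input ix hInv.1 p hp]
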